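-- pv_equiv track=rewrite | github.com/okkhoury/smart-alarm-api | api/views.py | getTimeFromWords
-- ===== SOURCE A (Python) =====
-- units = [
--         "oh", "one", "two", "three", "four", "five", "six", "seven", "eight",
--         "nine", "ten", "eleven", "twelve", "thirteen", "fourteen", "fifteen",
--         "sixteen", "seventeen", "eighteen", "nineteen", "twenty"
--       ]
--
-- def getTimeFromWords(data):
--
-- 	time = 0;
-- 	mag = 1;
--
-- 	hour = ""
-- 	minutes = 0
-- 	timeOfDay = "am"
--
-- 	hourFound = False
--
-- 	for word in data:
-- 		if word == "pm":
-- 				timeOfDay = "pm"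
--
-- 		if word in units:
-- 			if hourFound == False:
-- 				hour = str(units.index(word))
-- 				hourFound = True
-- 			else:
-- 				minutes += units.index(word)
--
-- 	if minutes < 10:
-- 		minutes = "0" + str(minutes);
--
-- 	return hour + ":" + str(minutes) + " " + timeOfDay
-- ===== SOURCE B (Python) =====
-- units = [
--         "oh", "one", "two", "three", "four", "five", "six", "seven", "eight",
--         "nine", "ten", "eleven", "twelve", "thirteen", "fourteen", "fifteen",
--         "sixteen", "seventeen", "eighteen", "nineteen", "twenty"
--       ]
--
-- def getTimeFromWords(data):
--     # total-minus-head: add up EVERY number word's value once (non-number words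
--     # contribute 0 via the dict default), then subtract the hour (the first
--     # number word) from the grand total to get the minutes.
--     idx = {w: i for i, w in enumerate(units)}
--     total = sum(idx.get(w, 0) for w in data)
--     first = next((idx[w] for w in data if w in idx), None)
--     if first is None:
--         hour, minutes = "", 0
--     else:
--         hour, minutes = str(first), total - first
--     tod = "pm" if "pm" in data else "am"
--     m = "0" + str(minutes) if minutes < 10 else str(minutes)
--     return hour + ":" + m + " " + tod
-- ===== Notes on version B (the rewrite author's own statement) =====
-- stated objective: alternative
-- what changed: Replaces A's stateful scan (hourFound flag, tail-only accumulator, repeated units.index list scans) with a total-minus-head aggregate over a precomputed word->index dict: one sum of every word's value (0 default), the hour found separately as the first dict hit, and minutes obtained by subtracting the hour from the grand total.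
import Mathlib
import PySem

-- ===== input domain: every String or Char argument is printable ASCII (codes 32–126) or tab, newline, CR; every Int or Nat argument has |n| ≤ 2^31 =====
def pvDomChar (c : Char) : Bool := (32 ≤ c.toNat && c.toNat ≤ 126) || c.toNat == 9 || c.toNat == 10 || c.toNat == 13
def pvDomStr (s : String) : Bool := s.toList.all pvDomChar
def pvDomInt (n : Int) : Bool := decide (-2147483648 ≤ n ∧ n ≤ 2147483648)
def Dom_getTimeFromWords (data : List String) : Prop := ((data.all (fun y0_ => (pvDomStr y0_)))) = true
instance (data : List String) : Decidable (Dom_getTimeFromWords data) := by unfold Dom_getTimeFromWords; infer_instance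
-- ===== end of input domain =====

-- B replaces A's stateful scan (hourFound flag, tail accumulator, repeated
-- units.index scans) with a total-minus-head aggregate over a precomputed
-- word->index dict. Objective: alternative.

-- ===== PORT A =====
def unitsL : List String :=
  ["oh", "one", "two", "three", "four", "five", "six", "seven", "eight",
   "nine", "ten", "eleven", "twelve", "thirteen", "fourteen", "fifteen",
   "sixteen", "seventeen", "eighteen", "nineteen", "twenty"]

-- one iteration of A's for-loop over the state (hour, minutes, timeOfDay, hourFound)
def stepA (st : String × Int × String × Bool) (word : String) : String × Int × String × Bool :=
  let tod := if word = "pm" then "pm" else st.2.2.1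
  if word ∈ unitsL then
    if st.2.2.2 = false then
      (PySem.Int.toStr (((PySem.List.index? unitsL word).getD 0 : Nat) : Int), st.2.1, tod, true)
    else
      (st.1, st.2.1 + (((PySem.List.index? unitsL word).getD 0 : Nat) : Int), tod, st.2.2.2)
  else (st.1, st.2.1, tod, st.2.2.2)

def getTimeFromWords (data : List String) : String :=
  let st := data.foldl stepA ("", 0, "am", false)
  let minutesStr := if st.2.1 < 10 then "0" ++ PySem.Int.toStr st.2.1 else PySem.Int.toStr st.2.1
  st.1 ++ ":" ++ minutesStr ++ " " ++ st.2.2.1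

-- ===== PORT B =====
-- idx = {w: i for i, w in enumerate(units)}
def idxD : PySem.Dict String Int :=
  (PySem.List.enumerate unitsL).foldl (fun d p => d.insert p.2 p.1) PySem.Dict.empty

def getTimeFromWords_alt (data : List String) : String :=
  let total : Int := data.foldl (fun s w => s + (idxD.getD w 0)) 0
  let first : Option Int := data.findSome? (fun w => if idxD.contains w then idxD.get? w else none)
  let hm : String × Int :=
    match first with
    | none => ("", 0)
    | some n => (PySem.Int.toStr n, total - n)
  let tod := if "pm" ∈ data then "pm" else "am"
  let m := if hm.2 < 10 then "0" ++ PySem.Int.toStr hm.2 else PySem.Int.toStr hm.2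
  hm.1 ++ ":" ++ m ++ " " ++ tod

-- ===== PRECONDITION & SPEC =====
def Spec_getTimeFromWords (data : List String) (out : String) : Prop := out = getTimeFromWords_alt data
instance (data : List String) (out : String) : Decidable (Spec_getTimeFromWords data out) := by unfold Spec_getTimeFromWords; infer_instance

-- ===== CLAIM (what is proved, stated in full; the proofs are below) =====
def Claim_equal_getTimeFromWords : Prop := ∀ (data : List String), Dom_getTimeFromWords data → Spec_getTimeFromWords data (getTimeFromWords data)

-- ===== LEMMAS AND PROOFS =====

-- the list of number-word values occurring in data, in order (proof device)
def numsOf (data : List String) : List Nat :=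
  (data.filter (fun w => decide (w ∈ unitsL))).map (fun w => (PySem.List.index? unitsL w).getD 0)

lemma numsOf_cons (w : String) (data : List String) :
    numsOf (w :: data) =
      if w ∈ unitsL then ((PySem.List.index? unitsL w).getD 0) :: numsOf data else numsOf data := by
  simp [numsOf, List.filter_cons]
  split_ifs <;> simp

-- B's dict agrees with list indexing
lemma idxD_get (w : String) :
    idxD.get? w = (PySem.List.index? unitsL w).map (fun n => (n : Int)) := by
  by_cases hw : w ∈ unitsL
  · fin_cases hw <;> decide
  · rw [(PySem.List.index?_eq_none_iff unitsL w).2 hw]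
    simp only [unitsL, List.mem_cons, List.not_mem_nil, or_false, not_or] at hw
    simp [idxD, unitsL, PySem.List.enumerate, PySem.Dict.get?_insert,
          PySem.Dict.get?_empty, hw]

lemma loop_char (data : List String) : ∀ (h : String) (m : Int) (tod : String),
    (data.foldl stepA (h, m, tod, true) =
      (h, m + ((numsOf data).sum : Nat), (if "pm" ∈ data then "pm" else tod), true))
    ∧ (data.foldl stepA (h, m, tod, false) =
      ((match numsOf data with | [] => h | n :: _ => PySem.Int.toStr (n : Int)),
       m + (((numsOf data).drop 1).sum : Nat),
       (if "pm" ∈ data then "pm" else tod),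
       (!(numsOf data).isEmpty))) := by
  induction data with
  | nil => intro h m tod; simp [numsOf]
  | cons w data ih =>
    intro h m tod
    have hpm : ("pm" : String) ∉ unitsL := by decide
    constructor
    · by_cases hp : w = "pm"
      · subst hp
        simp [List.foldl_cons, stepA, hpm, numsOf_cons, (ih _ _ _).1, List.mem_cons]
      · have hp' : ¬ ("pm" = w) := fun hh => hp hh.symm
        by_cases hw : w ∈ unitsL <;>
          simp [List.foldl_cons, stepA, hw, hp, hp', numsOf_cons, (ih _ _ _).1,
                List.mem_cons, add_assoc]
    · by_cases hp : w = "pm"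
      · subst hp
        simp [List.foldl_cons, stepA, hpm, numsOf_cons, (ih _ _ _).2, List.mem_cons]
      · have hp' : ¬ ("pm" = w) := fun hh => hp hh.symm
        by_cases hw : w ∈ unitsL <;>
          simp [List.foldl_cons, stepA, hw, hp, hp', numsOf_cons, (ih _ _ _).1,
                (ih _ _ _).2, List.mem_cons]

-- B's total is the sum of ALL number-word values in data
lemma total_char (data : List String) : ∀ (s : Int),
    data.foldl (fun s w => s + (idxD.getD w 0)) s = s + ((numsOf data).sum : Nat) := by
  induction data with
  | nil => intro s; simp [numsOf]
  | cons w data ih =>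
    intro s
    by_cases hw : w ∈ unitsL
    · have : idxD.getD w 0 = (((PySem.List.index? unitsL w).getD 0 : Nat) : Int) := by
        rw [PySem.Dict.getD_eq_get?_getD, idxD_get]
        rcases h : PySem.List.index? unitsL w with _ | k
        · rw [PySem.List.index?_eq_none_iff] at h; exact absurd hw h
        · simp
      simp [List.foldl_cons, this, ih, numsOf_cons, hw, add_assoc]
    · have h0 : idxD.getD w 0 = 0 := by
        rw [PySem.Dict.getD_eq_get?_getD, idxD_get,
            (PySem.List.index?_eq_none_iff unitsL w).2 hw]
        rfl
      simp [List.foldl_cons, h0, ih, numsOf_cons, hw]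

-- B's first hit is the head of numsOf
lemma first_char (data : List String) :
    data.findSome? (fun w => if idxD.contains w then idxD.get? w else none) =
      (numsOf data).head?.map (fun n => (n : Int)) := by
  induction data with
  | nil => simp [numsOf]
  | cons w data ih =>
    by_cases hw : w ∈ unitsL
    · have hidx : idxD.get? w = some (((PySem.List.index? unitsL w).getD 0 : Nat) : Int) := by
        rw [idxD_get]
        rcases h : PySem.List.index? unitsL w with _ | k
        · rw [PySem.List.index?_eq_none_iff] at h; exact absurd hw h
        · simp
      have hc : idxD.contains w = true := by
        rcases hcc : idxD.contains w
        · exact absurd ((PySem.Dict.get?_eq_none_iff_contains idxD w).2 hcc) (by simp [hidx])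
        · rfl
      simp [hc, hidx, numsOf_cons, hw]
    · have hn : idxD.get? w = none := by
        rw [idxD_get, (PySem.List.index?_eq_none_iff unitsL w).2 hw]
        rfl
      have hc : idxD.contains w = false :=
        (PySem.Dict.get?_eq_none_iff_contains idxD w).1 hn
      simp [hc, numsOf_cons, hw, ih]

-- ===== VERDICT (by name: the statement is the Claim_ definition above) =====
theorem getTimeFromWords_spec : Claim_equal_getTimeFromWords := by
  intro data _
  unfold Spec_getTimeFromWords getTimeFromWords getTimeFromWords_alt
  rw [(loop_char data "" 0 "am").2, total_char data 0, first_char data]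
  cases hn : numsOf data with
  | nil => simp
  | cons n t =>
    simp only [hn, List.head?_cons, Option.map_some]
    have h1 : (0 : Int) + ((n :: t).sum : Nat) - (n : Int) = ((t.sum : Nat) : Int) := by
      push_cast [List.sum_cons]; ring
    simp [h1]
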